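-- pv_equiv track=rewrite | github.com/JanSchor/manim | schor/bm-search.py | convertBitMap
-- ===== SOURCE A (Python) =====
-- def convertBitMap(returnMap):
--     for i, line in enumerate(returnMap):
--         pairLine = []
--         for j, val in enumerate(line):
--             if j <= 0:
--                 hmod = 0
--             else:
--                 hmod = returnMap[i][j-1][1]
--             if i <= 0:
--                 vmod = 0
--             else:
--                 vmod = returnMap[i-1][j][0]
--
--             firstVal = val*(1 + vmod)
--             secondVal = val*(1 + hmod)
--             pair = [firstVal, secondVal]
--             returnMap[i][j] = pair
--
--     return returnMap
-- ===== SOURCE B (Python) =====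
-- def convertBitMap(returnMap):
--     orig = [list(row) for row in returnMap]
--     n = len(orig)
--     first = [[0] * len(row) for row in orig]
--     width = max((len(row) for row in orig), default=0)
--     # vertical pass, column by column, running accumulator down each column
--     for j in range(width):
--         prev = 0
--         for i in range(n):
--             if j >= len(orig[i]):
--                 break
--             v = orig[i][j] * (1 + prev)
--             first[i][j] = v
--             prev = v
--     # horizontal pass, row by row, running accumulator along each row
--     out = []
--     for i, row in enumerate(orig):
--         prev = 0
--         newRow = []
--         for j, val in enumerate(row):
--             s = val * (1 + prev)
--             newRow.append([first[i][j], s])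
--             prev = s
--         out.append(newRow)
--     return out
-- ===== Notes on version B (the rewrite author's own statement) =====
-- stated objective: alternative
-- what changed: A does one fused in-place pass that overwrites cells with pairs and reads the mutated structure back (prev pair's second, previous row's first); B snapshots the scalars, computes the vertical run-length values in a separate column-major pass with a running accumulator per column, the horizontal ones in a separate row-major pass, and assembles a fresh output (return value only: A mutates its argument, B does not).
import Mathlib
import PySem

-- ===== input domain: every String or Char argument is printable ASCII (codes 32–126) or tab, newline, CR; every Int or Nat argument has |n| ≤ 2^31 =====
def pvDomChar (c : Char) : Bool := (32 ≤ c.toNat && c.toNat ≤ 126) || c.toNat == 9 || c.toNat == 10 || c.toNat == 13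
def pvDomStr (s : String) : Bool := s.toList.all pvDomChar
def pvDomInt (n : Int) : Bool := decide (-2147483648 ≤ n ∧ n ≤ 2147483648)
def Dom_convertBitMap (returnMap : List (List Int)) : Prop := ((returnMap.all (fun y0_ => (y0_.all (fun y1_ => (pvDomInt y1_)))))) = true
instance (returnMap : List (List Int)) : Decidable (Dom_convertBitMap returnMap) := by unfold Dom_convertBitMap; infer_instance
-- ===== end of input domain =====

-- B replaces A's fused in-place pass (which overwrites cells with pairs and reads them back) by a
-- snapshot plus two independent passes: a column-major vertical pass and a row-major horizontal pass
-- (equivalence is about the RETURN value only: Python A mutates its argument, B does not).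


-- ===== PORT A =====
-- inner loop of A: `prev` is returnMap[i-1] (the previous, already-converted row), `acc` is the
-- already-converted prefix of row i (Python reads both back out of the mutated returnMap).
def convCols (i : Nat) (prev : Option (List (List Int))) (j : Nat) (line : List Int)
    (acc : List (List Int)) : List (List Int) :=
  match line with
  | [] => acc
  | val :: rest =>
      let hmod : Int := if j ≤ 0 then 0 else
        (PySem.List.pyGet? ((PySem.List.pyGet? acc ((j : Int) - 1)).getD []) 1).getD 0
      let vmod : Int := if i ≤ 0 then 0 else
        (PySem.List.pyGet? ((PySem.List.pyGet? (prev.getD []) (j : Int)).getD []) 0).getD 0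
      let firstVal := val * (1 + vmod)
      let secondVal := val * (1 + hmod)
      convCols i prev (j + 1) rest (acc ++ [[firstVal, secondVal]])

def convRows (i : Nat) (remaining : List (List Int)) (done : List (List (List Int))) :
    List (List (List Int)) :=
  match remaining with
  | [] => done
  | line :: rest => convRows (i + 1) rest (done ++ [convCols i done.getLast? 0 line []])

def convertBitMap (returnMap : List (List Int)) : List (List (List Int)) :=
  convRows 0 returnMap []

-- ===== PORT B =====
-- one vertical step of column j: walk the rows top-down with the running accumulator `prev`,
-- stopping (Python `break`) at the first row that lacks column j.
def vcol (j : Nat) (orig frows : List (List Int)) (prev : Int) : List (List Int) :=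
  match orig, frows with
  | o :: os, f :: fs =>
      if j < o.length then
        let v := o.getD j 0 * (1 + prev)
        f.set j v :: vcol j os fs v
      else f :: fs
  | _, fr => fr

-- horizontal pass over one row, running accumulator `prev`; `fvals` are the vertical values.
def hrow (prev : Int) (vals fvals : List Int) : List (List Int) :=
  match vals, fvals with
  | v :: vr, f :: fr => let s := v * (1 + prev); [f, s] :: hrow s vr fr
  | _, _ => []

def convertBitMap_alt (returnMap : List (List Int)) : List (List (List Int)) :=
  let orig := returnMap
  let first0 := orig.map (fun r => r.map (fun _ => (0 : Int)))
  let width := orig.foldl (fun m r => max m r.length) 0   -- max(len(row) for row), default 0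
  let first := (List.range width).foldl (fun f j => vcol j orig f 0) first0
  List.zipWith (fun r fr => hrow 0 r fr) orig first

-- ===== PRECONDITION & SPEC =====
-- Pre_ excludes exactly the inputs where Python A raises IndexError: a row longer than the row
-- above it makes A read returnMap[i-1][j] past the end of the previous row.
def Pre_convertBitMap (returnMap : List (List Int)) : Prop :=
  List.IsChain (fun a b => b.length ≤ a.length) returnMap
instance (returnMap : List (List Int)) : Decidable (Pre_convertBitMap returnMap) := by
  unfold Pre_convertBitMap; infer_instance

def pvWitness_convertBitMap : List (List Int) := [[1, 2, 3], [4, 5], [6]]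

def Spec_convertBitMap (returnMap : List (List Int)) (out : List (List (List Int))) : Prop :=
  out = convertBitMap_alt returnMap
instance (returnMap : List (List Int)) (out : List (List (List Int))) :
    Decidable (Spec_convertBitMap returnMap out) := by unfold Spec_convertBitMap; infer_instance

-- ===== CLAIM (what is proved, stated in full; the proofs are below) =====
def Claim_equal_convertBitMap : Prop := ∀ (returnMap : List (List Int)),
  Dom_convertBitMap returnMap → Pre_convertBitMap returnMap →
  Spec_convertBitMap returnMap (convertBitMap returnMap)

-- ===== LEMMAS AND PROOFS =====

-- The common mathematical description both programs compute: per cell [firstVal, secondVal] with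
-- firstVal accumulated down the column and secondVal along the row.
def rowF : List Int → List Int → List Int
  | _, [] => []
  | P, v :: vr => v * (1 + P.headD 0) :: rowF P.tail vr

def rowPairs : List Int → Int → List Int → List (List Int)
  | _, _, [] => []
  | P, pS, v :: vr => [v * (1 + P.headD 0), v * (1 + pS)] :: rowPairs P.tail (v * (1 + pS)) vr

def Fgrid : List Int → List (List Int) → List (List Int)
  | _, [] => []
  | P, r :: rs => rowF P r :: Fgrid (rowF P r) rs

def pairGrid : List Int → List (List Int) → List (List (List Int))
  | _, [] => []
  | P, r :: rs => rowPairs P 0 r :: pairGrid (rowF P r) rs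

theorem length_rowF (P l : List Int) : (rowF P l).length = l.length := by
  induction l generalizing P with
  | nil => simp [rowF]
  | cons v vr ih => simp [rowF, ih]

theorem length_rowPairs (P : List Int) (pS : Int) (l : List Int) :
    (rowPairs P pS l).length = l.length := by
  induction l generalizing P pS with
  | nil => simp [rowPairs]
  | cons v vr ih => simp [rowPairs, ih]

theorem firsts_rowPairs (P : List Int) (pS : Int) (l : List Int) :
    (rowPairs P pS l).map (fun p => p.headD 0) = rowF P l := by
  induction l generalizing P pS with
  | nil => simp [rowPairs, rowF]
  | cons v vr ih => simp only [rowPairs, rowF, List.map_cons, List.cons.injEq]; exact ⟨rfl, ih _ _⟩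

theorem rowF_getD (l P : List Int) (j : Nat) (h : j < l.length) :
    (rowF P l).getD j 0 = l.getD j 0 * (1 + P.getD j 0) := by
  induction l generalizing P j with
  | nil => simp at h
  | cons v vr ih =>
      cases j with
      | zero => cases P <;> simp [rowF]
      | succ j =>
          simp only [rowF, List.getD_cons_succ]
          rw [ih _ _ (by simpa using h)]
          cases P <;> simp

theorem rowF_append (P xs ys : List Int) :
    rowF P (xs ++ ys) = rowF P xs ++ rowF (P.drop xs.length) ys := by
  induction xs generalizing P with
  | nil => simp [rowF]
  | cons x xt ih =>
      simp only [List.cons_append, rowF, List.length_cons, ih, List.cons.injEq, true_and]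
      rw [List.drop_tail]

-- ===== A side =====

theorem convCols_eq (line : List Int) (prev : Option (List (List Int))) (i : Nat) :
    ∀ (j : Nat) (acc : List (List Int)) (pS : Int),
    acc.length = j →
    (if j = 0 then pS = 0 else
      (PySem.List.pyGet? ((PySem.List.pyGet? acc ((j : Int) - 1)).getD []) 1).getD 0 = pS) →
    (∀ lp, prev = some lp → i ≠ 0 → j + line.length ≤ lp.length) →
    convCols i prev j line acc =
      acc ++ rowPairs (if i = 0 then []
        else ((prev.getD []).map (fun p => p.headD 0)).drop j) pS line := by
  induction line with
  | nil => intro j acc pS _ _ _; simp [convCols, rowPairs]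
  | cons v vr ih =>
      intro j acc pS hlen hS hP
      have hmod : (if j ≤ 0 then (0 : Int) else
          (PySem.List.pyGet? ((PySem.List.pyGet? acc ((j : Int) - 1)).getD []) 1).getD 0) = pS := by
        by_cases hj : j = 0
        · subst hj; simp at hS ⊢; omega
        · rw [if_neg (by omega)]; simpa [hj] using hS
      have hS' : ∀ (f s : Int),
          (if j + 1 = 0 then (v * (1 + pS)) = 0 else (PySem.List.pyGet? ((PySem.List.pyGet? (acc ++ [[f, s]])
            (((j + 1 : Nat) : Int) - 1)).getD []) 1).getD 0 = s) := by
        intro f s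
        rw [if_neg (Nat.succ_ne_zero j)]
        have h1 : (((j + 1 : Nat) : Int) - 1) = ((j : Nat) : Int) := by push_cast; ring
        rw [h1, PySem.List.pyGet?_natCast, List.getElem?_append_right (by omega)]
        simp [hlen, PySem.List.pyGet?, PySem.List.pyIdx?]
      by_cases hi : i = 0
      · subst hi
        rw [convCols, hmod, if_pos (Nat.le_refl 0)]
        rw [ih (j + 1) (acc ++ [[v * (1 + 0), v * (1 + pS)]]) (v * (1 + pS))
          (by simp [hlen]) (hS' _ _) (fun lp hlp hi0 => absurd rfl hi0)]
        simp [rowPairs]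
      · rw [convCols, hmod, if_neg (show ¬ i ≤ 0 by omega)]
        cases prev with
        | none =>
            simp only [Option.getD_none]
            have hvm0 : (PySem.List.pyGet? ((PySem.List.pyGet? ([] : List (List Int))
                ((j : Nat) : Int)).getD []) 0).getD 0 = 0 := by
              simp [PySem.List.pyGet?, PySem.List.pyIdx?]
            rw [hvm0, ih (j + 1) _ (v * (1 + pS))
              (by simp [hlen]) (hS' _ _) (fun lp hlp _ => by cases hlp)]
            simp [rowPairs]
        | some lp =>
            simp only [Option.getD_some]
            have hj : j < lp.length := by
              have := hP lp rfl hi; simp at this; omega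
            have hvm : (PySem.List.pyGet? ((PySem.List.pyGet? lp ((j : Nat) : Int)).getD [])
                0).getD 0 = lp[j].headD 0 := by
              rw [PySem.List.pyGet?_natCast, List.getElem?_eq_getElem hj]
              simp [PySem.List.pyGet?_zero, List.head?_eq_getElem?]
            rw [hvm, ih (j + 1) _ (v * (1 + pS))
              (by simp [hlen]) (hS' _ _)
              (fun lp' hlp' _ => by injection hlp' with h; subst h; have := hP _ rfl hi; simp at this; omega)]
            have hdj : ((lp.map (fun p => p.headD 0)).drop j) =
                lp[j].headD 0 :: (lp.map (fun p => p.headD 0)).drop (j + 1) := by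
              rw [List.drop_eq_getElem_cons (by simpa using hj)]
              simp
            simp only [if_neg hi, hdj, rowPairs, List.headD_cons, List.tail_cons]
            simp

theorem convRows_eq (rows : List (List Int)) :
    ∀ (i : Nat) (done : List (List (List Int))) (P : List Int),
    (i = 0 → done = [] ∧ P = []) →
    (i ≠ 0 → ∃ lp, done.getLast? = some lp ∧ P = lp.map (fun p => p.headD 0) ∧
      ∀ r ∈ rows.head?.toList, r.length ≤ lp.length) →
    List.IsChain (fun a b => b.length ≤ a.length) rows →
    convRows i rows done = done ++ pairGrid P rows := by
  induction rows with
  | nil => intro i done P _ _ _; simp [convRows, pairGrid]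
  | cons r rs ih =>
      intro i done P h0 h1 hch
      have hch' := List.isChain_cons.mp hch
      rw [convRows]
      by_cases hi : i = 0
      · obtain ⟨hd, hp⟩ := h0 hi
        subst hd hp hi
        have hc : convCols 0 none 0 r [] = rowPairs [] 0 r := by
          have := convCols_eq r none 0 0 [] 0 rfl (by simp) (fun lp hlp _ => by cases hlp)
          simpa using this
        simp only [List.getLast?_nil, hc, List.nil_append]
        rw [ih 1 _ (rowF [] r) (by intro h; cases h)
          (fun _ => ⟨rowPairs [] 0 r, by simp, (firsts_rowPairs [] 0 r).symm, by
            intro r' hr'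
            rw [length_rowPairs]
            exact hch'.1 r' (by simpa using hr')⟩) hch'.2]
        simp [pairGrid]
      · obtain ⟨lp, hlast, hPmap, hbound⟩ := h1 hi
        have hc : convCols i (some lp) 0 r [] = rowPairs P 0 r := by
          have := convCols_eq r (some lp) i 0 [] 0 rfl (by simp)
            (fun lp' h' _ => by
              injection h' with h'; subst h'
              simpa using hbound r (by simp))
          rw [if_neg hi, List.drop_zero, Option.getD_some, ← hPmap] at this
          simpa using this
        rw [hlast, hc]
        rw [ih (i + 1) (done ++ [rowPairs P 0 r]) (rowF P r) (by simp)
          (fun _ => ⟨rowPairs P 0 r, List.getLast?_concat, (firsts_rowPairs P 0 r).symm, by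
            intro r' hr'
            rw [length_rowPairs]
            exact hch'.1 r' (by simpa using hr')⟩) hch'.2]
        simp [pairGrid]

theorem A_eq_pairGrid (rm : List (List Int)) (h : Pre_convertBitMap rm) :
    convertBitMap rm = pairGrid [] rm := by
  have := convRows_eq rm 0 [] [] (fun _ => ⟨rfl, rfl⟩) (fun h0 => absurd rfl h0) h
  simpa [convertBitMap] using this

-- ===== B side =====

theorem vcol_noop (j : Nat) (orig f : List (List Int)) (p : Int)
    (h : ∀ o, orig.head? = some o → o.length ≤ j) : vcol j orig f p = f := by
  match orig, f with
  | [], f => simp [vcol]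
  | o :: os, [] => simp [vcol]
  | o :: os, f0 :: fs =>
      rw [vcol, if_neg (by have := h o rfl; omega)]

theorem foldl_noop {α β : Type} (l : List β) (step : α → β → α) (f0 : α)
    (h : ∀ f b, b ∈ l → step f b = f) : l.foldl step f0 = f0 := by
  induction l generalizing f0 with
  | nil => rfl
  | cons b bs ih => simp only [List.foldl_cons, h f0 b (by simp)]; exact ih _ fun f b hb => h f b (by simp [hb])

theorem set_append_len {α : Type} (xs : List α) (y : α) (ys : List α) (v : α) (m : Nat)
    (h : xs.length = m) : (xs ++ y :: ys).set m v = xs ++ v :: ys := by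
  subst h
  induction xs with
  | nil => rfl
  | cons x xt ih => simp [ih]

theorem aux1 (m : Nat) (r : List Int) (rs : List (List Int)) (P : List Int)
    (Z : List (List Int)) : m ≤ r.length →
    (List.range m).foldl (fun f j => vcol j (r :: rs) f (P.getD j 0))
        ((r.map fun _ => (0 : Int)) :: Z) =
      (rowF P (r.take m) ++ (r.drop m).map fun _ => (0 : Int)) ::
        (List.range m).foldl (fun f j => vcol j rs f ((rowF P r).getD j 0)) Z := by
  induction m with
  | zero => intro _; simp [rowF]
  | succ m ih =>
      intro hm
      have hmlt : m < r.length := hm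
      rw [List.range_succ, List.foldl_append, List.foldl_append, ih (le_of_lt hmlt)]
      simp only [List.foldl_cons, List.foldl_nil]
      have hlen : (rowF P (r.take m)).length = m := by
        rw [length_rowF, List.length_take]; omega
      have hv : (rowF P r).getD m 0 = r.getD m 0 * (1 + P.getD m 0) := rowF_getD r P m hmlt
      have htk : (r.take m).length = m := by rw [List.length_take]; omega
      have htake : rowF P (r.take (m + 1)) =
          rowF P (r.take m) ++ [r.getD m 0 * (1 + P.getD m 0)] := by
        rw [List.take_succ, List.getElem?_eq_getElem hmlt]
        simp only [Option.toList_some, rowF_append, htk]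
        congr 1
        simp [rowF, List.getD_eq_getElem?_getD, List.getElem?_eq_getElem hmlt]
      have hset : (rowF P (r.take m) ++ (r.drop m).map (fun _ => (0 : Int))).set m
            (r.getD m 0 * (1 + P.getD m 0)) =
          rowF P (r.take (m + 1)) ++ (r.drop (m + 1)).map (fun _ => (0 : Int)) := by
        rw [List.drop_eq_getElem_cons hmlt, List.map_cons, set_append_len _ _ _ _ _ hlen, htake]
        simp
      rw [vcol, if_pos hmlt]
      simp only [hset, hv]

theorem mainB (rows : List (List Int)) (P : List Int) (w : Nat)
    (hw : ∀ r ∈ rows, r.length ≤ w)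
    (hch : List.IsChain (fun a b => b.length ≤ a.length) rows) :
    (List.range w).foldl (fun f j => vcol j rows f (P.getD j 0))
        (rows.map fun r => r.map fun _ => (0 : Int)) = Fgrid P rows := by
  induction rows generalizing P with
  | nil =>
      simp only [List.map_nil, Fgrid]
      exact foldl_noop _ _ _ (fun f j _ => by simp [vcol])
  | cons r rs ih =>
      have hr : r.length ≤ w := hw r (by simp)
      have hch' := List.isChain_cons.mp hch
      have hsplit : List.range w =
          List.range r.length ++ (List.range (w - r.length)).map (r.length + ·) := by
        rw [← List.range_add]; congr 1; omega
      have hmem : ∀ j ∈ (List.range (w - r.length)).map (r.length + ·), r.length ≤ j := by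
        intro j hj
        simp only [List.mem_map, List.mem_range] at hj
        omega
      have h2 : ∀ (j : Nat), r.length ≤ j → ∀ (f : List (List Int)) (p : Int),
          vcol j rs f p = f := by
        intro j hj f p
        exact vcol_noop j rs f p (fun o ho => le_trans (hch'.1 o ho) hj)
      have hinner : (List.range w).foldl (fun f j => vcol j rs f ((rowF P r).getD j 0))
            (rs.map fun rr => rr.map fun _ => (0 : Int)) =
          (List.range r.length).foldl (fun f j => vcol j rs f ((rowF P r).getD j 0))
            (rs.map fun rr => rr.map fun _ => (0 : Int)) := by
        rw [hsplit, List.foldl_append]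
        exact foldl_noop _ _ _ (fun f j hj => h2 j (hmem j hj) f _)
      rw [hsplit, List.foldl_append, List.map_cons,
        aux1 r.length r rs P (rs.map fun rr => rr.map fun _ => (0 : Int)) (le_refl _)]
      simp only [List.take_length, List.drop_length, List.map_nil, List.append_nil]
      rw [foldl_noop _ _ _ (fun f j hj => by
        refine vcol_noop j (r :: rs) f _ (fun o ho => ?_)
        cases Option.some.inj ho
        exact hmem j hj)]
      simp only [Fgrid]
      rw [← hinner, ih (rowF P r) (fun rr hrr => hw rr (by simp [hrr])) hch'.2]

theorem hrow_rowF (l P : List Int) (pS : Int) : hrow pS l (rowF P l) = rowPairs P pS l := by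
  induction l generalizing P pS with
  | nil => simp [hrow, rowPairs]
  | cons v vr ih => simp [rowF, hrow, rowPairs, ih]

theorem zip_hrow (rows : List (List Int)) (P : List Int) :
    List.zipWith (fun r fr => hrow 0 r fr) rows (Fgrid P rows) = pairGrid P rows := by
  induction rows generalizing P with
  | nil => simp [Fgrid, pairGrid]
  | cons r rs ih => simp [Fgrid, pairGrid, hrow_rowF, ih]

theorem B_eq_pairGrid (rm : List (List Int)) (h : Pre_convertBitMap rm) :
    convertBitMap_alt rm = pairGrid [] rm := by
  have hw := (PySem.List.le_foldl_max_nat rm (fun r => r.length) 0).2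
  have hstep : (fun (f : List (List Int)) (j : Nat) => vcol j rm f 0) =
      fun f j => vcol j rm f (([] : List Int).getD j 0) := by
    funext f j; simp
  simp only [convertBitMap_alt]
  rw [hstep, mainB rm [] _ hw h, zip_hrow]

-- ===== VERDICT (by name: the statement is the Claim_ definition above) =====
theorem convertBitMap_spec : Claim_equal_convertBitMap := by
  intro rm _ hpre
  unfold Spec_convertBitMap
  rw [A_eq_pairGrid rm hpre, B_eq_pairGrid rm hpre]
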